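-- pv_equiv track=rewrite | github.com/MrBrantCode/unitest_baseline | mut_generate/mist_train_taco/taco_191/solution.py | calculate_minimum_city_area
-- ===== SOURCE A (Python) =====
-- def calculate_minimum_city_area(mines):
--     if not mines:
--         return 0
--
--     x_coords = [mine[0] for mine in mines]
--     y_coords = [mine[1] for mine in mines]
--
--     max_x = max(x_coords)
--     min_x = min(x_coords)
--     max_y = max(y_coords)
--     min_y = min(y_coords)
--
--     side_length = max(max_x - min_x, max_y - min_y)
--
--     return side_length ** 2
-- ===== SOURCE B (Python) =====
-- def calculate_minimum_city_area(mines):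
--     if not mines:
--         return 0
--     xs = sorted([mine[0] for mine in mines])
--     ys = sorted([mine[1] for mine in mines])
--     return max(xs[-1] - xs[0], ys[-1] - ys[0]) ** 2
-- ===== Notes on version B (the rewrite author's own statement) =====
-- stated objective: alternative
-- what changed: Replaces the four max/min scans with sorting each coordinate list and reading the span off the sorted endpoints (first and last element); correct because sorting a list puts its minimum first and its maximum last.
import Mathlib
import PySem

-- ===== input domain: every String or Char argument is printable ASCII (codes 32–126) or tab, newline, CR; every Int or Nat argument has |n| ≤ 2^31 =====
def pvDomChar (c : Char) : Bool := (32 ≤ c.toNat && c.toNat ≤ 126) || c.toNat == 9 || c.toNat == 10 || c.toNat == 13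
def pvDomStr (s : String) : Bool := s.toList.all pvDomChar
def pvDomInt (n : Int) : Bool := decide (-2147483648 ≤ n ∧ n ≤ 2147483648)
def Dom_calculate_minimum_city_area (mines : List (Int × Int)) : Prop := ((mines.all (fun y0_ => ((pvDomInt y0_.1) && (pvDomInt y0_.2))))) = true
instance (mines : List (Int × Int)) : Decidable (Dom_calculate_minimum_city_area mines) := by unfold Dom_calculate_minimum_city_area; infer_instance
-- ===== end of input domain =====

-- ===== PORT A =====
-- B sorts each coordinate list and reads the span off the sorted endpoints instead of A's four max/min scans (alternative algorithm, not claimed faster).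
def calculate_minimum_city_area (mines : List (Int × Int)) : Int :=
  match mines with
  | [] => 0
  | m :: rest =>
    let x_coords := (m :: rest).map (fun mine => mine.1)
    let y_coords := (m :: rest).map (fun mine => mine.2)
    -- the list is nonempty, so max?/min? are some; getD 0 is never the default here
    let max_x := (PySem.List.max? x_coords (fun v => v)).getD 0
    let min_x := (PySem.List.min? x_coords (fun v => v)).getD 0
    let max_y := (PySem.List.max? y_coords (fun v => v)).getD 0
    let min_y := (PySem.List.min? y_coords (fun v => v)).getD 0
    let side_length := max (max_x - min_x) (max_y - min_y)
    side_length ^ 2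

-- ===== PORT B =====
def calculate_minimum_city_area_alt (mines : List (Int × Int)) : Int :=
  match mines with
  | [] => 0
  | m :: rest =>
    let xs := PySem.List.sorted ((m :: rest).map (fun mine => mine.1)) (fun v => v) false
    let ys := PySem.List.sorted ((m :: rest).map (fun mine => mine.2)) (fun v => v) false
    -- the sorted lists are nonempty, so the [-1]/[0] accesses are some; getD 0 is never the default here
    (max ((PySem.List.pyGet? xs (-1)).getD 0 - (PySem.List.pyGet? xs 0).getD 0)
         ((PySem.List.pyGet? ys (-1)).getD 0 - (PySem.List.pyGet? ys 0).getD 0)) ^ 2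

-- ===== PRECONDITION & SPEC =====
def Spec_calculate_minimum_city_area (mines : List (Int × Int)) (out : Int) : Prop := out = calculate_minimum_city_area_alt mines
instance (mines : List (Int × Int)) (out : Int) : Decidable (Spec_calculate_minimum_city_area mines out) := by unfold Spec_calculate_minimum_city_area; infer_instance

-- ===== CLAIM (what is proved, stated in full; the proofs are below) =====
def Claim_equal_calculate_minimum_city_area : Prop := ∀ (mines : List (Int × Int)), Dom_calculate_minimum_city_area mines → Spec_calculate_minimum_city_area mines (calculate_minimum_city_area mines)

-- ===== LEMMAS AND PROOFS =====

lemma foldl_min_mem (t : List Int) : ∀ a : Int, t.foldl min a ∈ a :: t := by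
  induction t with
  | nil => intro a; simp
  | cons b t ih =>
    intro a
    simp only [List.foldl]
    rcases List.mem_cons.mp (ih (min a b)) with h | h
    · rw [h]
      rcases min_cases a b with ⟨he, _⟩ | ⟨he, _⟩ <;> simp [he]
    · simp [h]

lemma foldl_min_le (t : List Int) : ∀ (a : Int), ∀ y ∈ a :: t, t.foldl min a ≤ y := by
  induction t with
  | nil => intro a y hy; simp at hy; simp [hy]
  | cons b t ih =>
    intro a y hy
    simp only [List.foldl]
    have hmin := ih (min a b) (min a b) List.mem_cons_self
    rcases List.mem_cons.mp hy with h1 | hy'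
    · rw [h1]; exact le_trans hmin (min_le_left a b)
    · rcases List.mem_cons.mp hy' with h2 | hy''
      · rw [h2]; exact le_trans hmin (min_le_right a b)
      · exact ih (min a b) y (List.mem_cons_of_mem _ hy'')

lemma foldl_max_mem (t : List Int) : ∀ a : Int, t.foldl max a ∈ a :: t := by
  induction t with
  | nil => intro a; simp
  | cons b t ih =>
    intro a
    simp only [List.foldl]
    rcases List.mem_cons.mp (ih (max a b)) with h | h
    · rw [h]
      rcases max_cases a b with ⟨he, _⟩ | ⟨he, _⟩ <;> simp [he]
    · simp [h]

lemma le_foldl_max' (t : List Int) : ∀ (a : Int), ∀ y ∈ a :: t, y ≤ t.foldl max a := by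
  induction t with
  | nil => intro a y hy; simp at hy; simp [hy]
  | cons b t ih =>
    intro a y hy
    simp only [List.foldl]
    have hmax := ih (max a b) (max a b) List.mem_cons_self
    rcases List.mem_cons.mp hy with h1 | hy'
    · rw [h1]; exact le_trans (le_max_left a b) hmax
    · rcases List.mem_cons.mp hy' with h2 | hy''
      · rw [h2]; exact le_trans (le_max_right a b) hmax
      · exact ih (max a b) y (List.mem_cons_of_mem _ hy'')

-- head of sorted(x::t) is the running minimum
lemma sorted_head_min (x : Int) (t : List Int) :
    (PySem.List.pyGet? (PySem.List.sorted (x :: t) (fun v => v) false) 0).getD 0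
      = t.foldl min x := by
  rcases hs : PySem.List.sorted (x :: t) (fun v => v) false with _ | ⟨m, s⟩
  · exact absurd ((PySem.List.sorted_eq_nil_iff _ _ _).mp hs) (by simp)
  · have hmem : m ∈ x :: t := by
      have := PySem.List.sorted_perm (x :: t) (fun v => v) false
      rw [hs] at this
      exact this.mem_iff.mp (by simp)
    have hle : ∀ y ∈ x :: t, m ≤ y := PySem.List.key_head_sorted_le (x :: t) (fun v => v) hs
    simp only [PySem.List.pyGet?, PySem.List.pyIdx?]
    norm_num
    exact le_antisymm (hle _ (foldl_min_mem t x)) (foldl_min_le t x m hmem)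

-- last of sorted(x::t) is the running maximum
lemma sorted_last_max (x : Int) (t : List Int) :
    (PySem.List.pyGet? (PySem.List.sorted (x :: t) (fun v => v) false) (-1)).getD 0
      = t.foldl max x := by
  have hlen : (PySem.List.sorted (x :: t) (fun v => v) false).length = t.length + 1 := by
    rw [PySem.List.length_sorted]; simp
  have hperm := PySem.List.sorted_perm (x :: t) (fun v => v) false
  have hmem : (PySem.List.sorted (x :: t) (fun v => v) false)[t.length]'(by omega) ∈ x :: t :=
    hperm.mem_iff.mp (List.getElem_mem _)
  have hge : ∀ y ∈ x :: t,
      y ≤ (PySem.List.sorted (x :: t) (fun v => v) false)[t.length]'(by omega) := by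
    intro y hy
    rcases List.getElem_of_mem (hperm.mem_iff.mpr hy) with ⟨p, hp, hpe⟩
    have hm := PySem.List.key_sorted_getElem_mono (x :: t) (fun v => v)
      (p := p) (q := t.length) (by omega) (by omega)
    simpa [hpe] using hm
  have hidx : PySem.List.pyGet? (PySem.List.sorted (x :: t) (fun v => v) false) (-1)
      = some ((PySem.List.sorted (x :: t) (fun v => v) false)[t.length]'(by omega)) := by
    simp [PySem.List.pyGet?, PySem.List.pyIdx?, hlen]
  rw [hidx, Option.getD_some]
  exact le_antisymm (le_foldl_max' t x _ hmem) (hge _ (foldl_max_mem t x))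

-- ===== VERDICT (by name: the statement is the Claim_ definition above) =====
theorem calculate_minimum_city_area_spec : Claim_equal_calculate_minimum_city_area := by
  intro mines _
  unfold Spec_calculate_minimum_city_area calculate_minimum_city_area calculate_minimum_city_area_alt
  cases mines with
  | nil => rfl
  | cons m rest =>
    simp only [List.map_cons, PySem.List.max?_id_cons, PySem.List.min?_id_cons,
      Option.getD_some, sorted_last_max, sorted_head_min]
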